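-- pv_equiv track=rewrite | github.com/QuentinTournier40/advent-of-code | 2/star_one.py | is_line_safe
-- ===== SOURCE A (Python) =====
-- def is_line_safe(line):
--     # not all increasing or all decreasing
--     if line != sorted(line) and line != sorted(line, reverse=True):
--         return False
--
--     good_difference = 0
--
--     for i in range(len(line) - 1):
--         if 0 < abs(line[i] - line[i + 1]) <= 3:
--             good_difference += 1
--
--     return good_difference == len(line) - 1
-- ===== SOURCE B (Python) =====
-- def is_line_safe(line):
--     # one linear pass over adjacent pairs: safe iff all steps are +1..+3 or all are -1..-3
--     pairs = list(zip(line, line[1:]))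
--     return (all(1 <= b - a <= 3 for a, b in pairs)
--             or all(-3 <= b - a <= -1 for a, b in pairs))
-- ===== Notes on version B (the rewrite author's own statement) =====
-- stated objective: faster
-- what changed: Replaces the sort-twice-and-compare monotonicity test plus a separate index-loop counting good differences with a single linear pass over adjacent pairs checking the step bounds directly.
-- intended difference: On the empty list A returns False only because its counter comparison degenerates to 0 == -1, while B returns True (an empty report is vacuously monotone and safe), which is the intended value. — e.g. on is_line_safe([]): A returns false, B returns true
import Mathlib
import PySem

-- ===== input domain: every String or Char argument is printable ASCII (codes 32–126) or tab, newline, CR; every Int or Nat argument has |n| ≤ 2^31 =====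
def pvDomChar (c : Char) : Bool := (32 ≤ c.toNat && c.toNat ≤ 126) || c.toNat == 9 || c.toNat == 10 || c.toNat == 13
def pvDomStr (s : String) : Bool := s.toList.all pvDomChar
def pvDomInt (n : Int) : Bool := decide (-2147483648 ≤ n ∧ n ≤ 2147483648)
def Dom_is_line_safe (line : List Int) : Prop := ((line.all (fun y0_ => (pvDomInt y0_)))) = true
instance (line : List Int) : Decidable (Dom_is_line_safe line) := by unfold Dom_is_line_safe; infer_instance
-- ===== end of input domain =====

-- B replaces A's sort-twice-and-compare test plus a counting index loop by one linear pass
-- over adjacent pairs (objective: faster, O(n) vs O(n log n)); on the empty list A returns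
-- False (its counter check degenerates to 0 == -1) while B returns True (stated as D_).


-- ===== PORT A =====
def is_line_safe (line : List Int) : Bool :=
  -- if line != sorted(line) and line != sorted(line, reverse=True): return False
  if line ≠ PySem.List.sorted line (fun x => x) ∧ line ≠ PySem.List.sorted line (fun x => x) true then
    false
  else
    -- for i in range(len(line) - 1): if 0 < abs(line[i] - line[i+1]) <= 3: good_difference += 1
    let good : Int :=
      (PySem.List.pyRange 0 ((line.length : Int) - 1)).foldl
        (fun acc i =>
          if 0 < |PySem.List.pyGetD line i 0 - PySem.List.pyGetD line (i + 1) 0| ∧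
              |PySem.List.pyGetD line i 0 - PySem.List.pyGetD line (i + 1) 0| ≤ 3 then
            acc + 1
          else acc) 0
    decide (good = (line.length : Int) - 1)

-- ===== PORT B =====
def is_line_safe_alt (line : List Int) : Bool :=
  -- pairs = list(zip(line, line[1:]))   (line[1:] = drop 1)
  let pairs := line.zip (line.drop 1)
  (pairs.all fun p => decide (1 ≤ p.2 - p.1 ∧ p.2 - p.1 ≤ 3)) ||
  (pairs.all fun p => decide (-3 ≤ p.2 - p.1 ∧ p.2 - p.1 ≤ -1))

-- ===== PRECONDITION & SPEC =====
-- On the empty list A returns False only because its counter comparison degenerates to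
-- 0 == -1, while B returns True (an empty report is vacuously monotone and safe), which
-- is the intended value.
def D_is_line_safe (line : List Int) : Prop := line = []
instance (line : List Int) : Decidable (D_is_line_safe line) := by unfold D_is_line_safe; infer_instance
def Spec_is_line_safe (line : List Int) (out : Bool) : Prop := ¬ D_is_line_safe line → out = is_line_safe_alt line
instance (line : List Int) (out : Bool) : Decidable (Spec_is_line_safe line out) := by unfold Spec_is_line_safe; infer_instance
def pvDiffWitness_is_line_safe : List Int := ([])
def pvDiffWitnessOut_is_line_safe : Bool × Bool := (false, true)

-- ===== CLAIM (what is proved, stated in full; the proofs are below) =====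
def Claim_unchanged_is_line_safe : Prop := ∀ (line : List Int), Dom_is_line_safe line → Spec_is_line_safe line (is_line_safe line)
def Claim_changed_is_line_safe : Prop := Dom_is_line_safe (pvDiffWitness_is_line_safe) ∧ D_is_line_safe (pvDiffWitness_is_line_safe) ∧ is_line_safe (pvDiffWitness_is_line_safe) = pvDiffWitnessOut_is_line_safe.1 ∧ is_line_safe_alt (pvDiffWitness_is_line_safe) = pvDiffWitnessOut_is_line_safe.2 ∧ pvDiffWitnessOut_is_line_safe.1 ≠ pvDiffWitnessOut_is_line_safe.2
def Claim_exact_is_line_safe : Prop := ∀ (line : List Int), Dom_is_line_safe line → D_is_line_safe line → is_line_safe line ≠ is_line_safe_alt line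

-- ===== LEMMAS AND PROOFS =====

-- adjacent-pair reading of B's two `all` scans
theorem zip_all_iff (l : List Int) (f : Int × Int → Bool) :
    ((l.zip (l.drop 1)).all f = true) ↔ ∀ (k : Nat) (h : k + 1 < l.length), f (l[k], l[k+1]) = true := by
  rw [List.drop_one, List.all_eq_true]
  constructor
  · intro h k hk
    have hlen : k < (l.zip l.tail).length := by
      simp only [List.length_zip, List.length_tail]; omega
    have := h _ (List.getElem_mem hlen)
    rwa [List.getElem_zip, List.getElem_tail] at this
  · intro h p hp
    rcases List.mem_iff_getElem.mp hp with ⟨k, hk, rfl⟩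
    have hk' : k + 1 < l.length := by
      simp only [List.length_zip, List.length_tail] at hk; omega
    rw [List.getElem_zip, List.getElem_tail]
    exact h k hk'

-- `line == sorted(line)` means adjacent-nondecreasing
theorem sorted_asc_iff (l : List Int) :
    l = PySem.List.sorted l (fun x => x) ↔ ∀ (k : Nat) (h : k + 1 < l.length), l[k] ≤ l[k+1] := by
  constructor
  · intro h
    have hp : l.Pairwise (fun a b : Int => a ≤ b) := by
      rw [h]
      exact PySem.List.sorted_pairwise l (fun x => x)
    exact List.isChain_iff_getElem.mp (List.isChain_iff_pairwise.mpr hp)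
  · intro h
    have hp : l.Pairwise (fun a b : Int => a ≤ b) :=
      List.isChain_iff_pairwise.mp (List.isChain_iff_getElem.mpr h)
    exact (PySem.List.sorted_eq_self_of_pairwise l (fun x => x) hp).symm

-- `line == sorted(line, reverse=True)` means adjacent-nonincreasing
theorem sorted_desc_iff (l : List Int) :
    l = PySem.List.sorted l (fun x => x) true ↔ ∀ (k : Nat) (h : k + 1 < l.length), l[k+1] ≤ l[k] := by
  haveI : Trans (fun a b : Int => b ≤ a) (fun a b : Int => b ≤ a) (fun a b : Int => b ≤ a) :=
    ⟨fun h1 h2 => le_trans h2 h1⟩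
  constructor
  · intro h
    have hp : l.Pairwise (fun a b : Int => b ≤ a) := by
      rw [h]
      exact PySem.List.sorted_pairwise_rev l (fun x => x)
    exact List.isChain_iff_getElem.mp (List.isChain_iff_pairwise.mpr hp)
  · intro h
    have hp : l.Pairwise (fun a b : Int => b ≤ a) :=
      List.isChain_iff_pairwise.mp (List.isChain_iff_getElem.mpr h)
    exact (PySem.List.sorted_rev_eq_self_of_pairwise l (fun x => x) hp).symm

-- A's loop counter reaches len-1 iff every adjacent difference is good
theorem good_count_iff (l : List Int) (hne : l ≠ []) :
    ((PySem.List.pyRange 0 ((l.length : Int) - 1)).foldl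
        (fun acc i =>
          if 0 < |PySem.List.pyGetD l i 0 - PySem.List.pyGetD l (i + 1) 0| ∧
              |PySem.List.pyGetD l i 0 - PySem.List.pyGetD l (i + 1) 0| ≤ 3 then
            acc + 1
          else acc) 0 = (l.length : Int) - 1)
    ↔ ∀ (k : Nat) (h : k + 1 < l.length),
        0 < |l[k] - l[k+1]| ∧ |l[k] - l[k+1]| ≤ 3 := by
  have hfun : (fun (acc : Int) (i : Int) =>
        if 0 < |PySem.List.pyGetD l i 0 - PySem.List.pyGetD l (i + 1) 0| ∧
            |PySem.List.pyGetD l i 0 - PySem.List.pyGetD l (i + 1) 0| ≤ 3 then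
          acc + 1
        else acc)
      = (fun (acc : Int) (i : Int) =>
          if (fun i : Int => decide (0 < |PySem.List.pyGetD l i 0 - PySem.List.pyGetD l (i + 1) 0| ∧
              |PySem.List.pyGetD l i 0 - PySem.List.pyGetD l (i + 1) 0| ≤ 3)) i = true then
            acc + 1
          else acc) := by
    funext acc i; simp
  rw [hfun, PySem.List.foldl_count_if, zero_add]
  set P : Int → Bool := fun i : Int =>
    decide (0 < |PySem.List.pyGetD l i 0 - PySem.List.pyGetD l (i + 1) 0| ∧
        |PySem.List.pyGetD l i 0 - PySem.List.pyGetD l (i + 1) 0| ≤ 3) with hP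
  have hlen : (PySem.List.pyRange 0 ((l.length : Int) - 1)).length = l.length - 1 := by
    rw [PySem.List.length_pyRange_one]; omega
  have hpos : 0 < l.length := List.length_pos_iff.mpr hne
  constructor
  · intro h k hk
    have hcount : List.countP P (PySem.List.pyRange 0 ((l.length : Int) - 1)) = l.length - 1 := by
      omega
    have hall := List.countP_eq_length.mp (by rw [hcount, hlen])
    have hmem : (k : Int) ∈ PySem.List.pyRange 0 ((l.length : Int) - 1) := by
      rw [PySem.List.mem_pyRange_one]; omega
    have hthis := hall _ hmem
    rw [hP] at hthis
    simp only [decide_eq_true_eq] at hthis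
    rw [PySem.List.pyGetD_of_nonneg l 0 (by omega), PySem.List.pyGetD_of_nonneg l 0 (by omega),
        (by omega : ((k : Int)).toNat = k), (by omega : ((k : Int) + 1).toNat = k + 1),
        List.getD_eq_getElem l 0 (by omega), List.getD_eq_getElem l 0 (by omega)] at hthis
    exact hthis
  · intro h
    have hall : ∀ i ∈ PySem.List.pyRange 0 ((l.length : Int) - 1), P i = true := by
      intro i hi
      rw [PySem.List.mem_pyRange_one] at hi
      have hk : i.toNat + 1 < l.length := by omega
      rw [hP]
      simp only [decide_eq_true_eq]
      rw [PySem.List.pyGetD_of_nonneg l 0 (by omega), PySem.List.pyGetD_of_nonneg l 0 (by omega),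
          (by omega : (i + 1).toNat = i.toNat + 1),
          List.getD_eq_getElem l 0 (by omega), List.getD_eq_getElem l 0 (by omega)]
      exact h i.toNat hk
    rw [List.countP_eq_length.mpr hall, hlen]
    omega

-- the pointwise arithmetic fact behind the equivalence
theorem abs_step_iff (a b : Int) :
    (0 < |a - b| ∧ |a - b| ≤ 3) ↔ ((1 ≤ b - a ∧ b - a ≤ 3) ∨ (-3 ≤ b - a ∧ b - a ≤ -1)) := by
  rcases abs_cases (a - b) with ⟨h1, h2⟩ | ⟨h1, h2⟩ <;> omega

-- ===== VERDICT (by name: the statement is the Claim_ definition above) =====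
theorem is_line_safe_spec : Claim_unchanged_is_line_safe := by
  intro line _ hD
  have hne : line ≠ [] := hD
  simp only [is_line_safe, is_line_safe_alt]
  by_cases hguard : line ≠ PySem.List.sorted line (fun x => x) ∧
      line ≠ PySem.List.sorted line (fun x => x) true
  · rw [if_pos hguard, Bool.eq_iff_iff]
    simp only [Bool.or_eq_true, zip_all_iff, decide_eq_true_eq]
    constructor
    · intro hf; exact absurd hf (by simp)
    · rintro (hup | hdn)
      · exact absurd ((sorted_asc_iff line).mpr (fun k hk => by have := hup k hk; omega)) hguard.1
      · exact absurd ((sorted_desc_iff line).mpr (fun k hk => by have := hdn k hk; omega)) hguard.2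
  · rw [if_neg hguard, Bool.eq_iff_iff, decide_eq_true_eq, good_count_iff line hne]
    rw [not_and_or, not_not, not_not] at hguard
    simp only [Bool.or_eq_true, zip_all_iff, decide_eq_true_eq]
    constructor
    · intro hgood
      rcases hguard with hasc | hdesc
      · left
        intro k hk
        have h1 := (sorted_asc_iff line).mp hasc k hk
        have h2 := (abs_step_iff _ _).mp (hgood k hk)
        omega
      · right
        intro k hk
        have h1 := (sorted_desc_iff line).mp hdesc k hk
        have h2 := (abs_step_iff _ _).mp (hgood k hk)
        omega
    · intro h k hk
      rw [abs_step_iff]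
      rcases h with hup | hdn
      · exact Or.inl (hup k hk)
      · exact Or.inr (hdn k hk)

theorem is_line_safe_changed : Claim_changed_is_line_safe := by
  unfold Claim_changed_is_line_safe; decide

theorem is_line_safe_tight : Claim_exact_is_line_safe := by
  intro line _ hD
  unfold D_is_line_safe at hD
  subst hD
  decide
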